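-- pv_equiv track=rewrite | github.com/lshowway/base | 03_vector_patching.py | get_target_layers
-- ===== SOURCE A (Python) =====
-- import math
--
-- def get_target_layers(total_layers, num_segments, segments_indx, swap_depth):
--     """(同上个版本: 计算目标层)"""
--     if num_segments <= 0: return list(range(total_layers))
--     layers_per_seg = math.ceil(total_layers / num_segments)
--     target_layers = []
--     for seg_idx in segments_indx:
--         if seg_idx < 0 or seg_idx >= num_segments: continue
--         start_idx = seg_idx * layers_per_seg
--         end_idx = min(start_idx + layers_per_seg, total_layers)
--         patch_start = max(start_idx, end_idx - swap_depth)
--         target_layers.extend(list(range(patch_start, end_idx)))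
--     return sorted(list(set(target_layers)))
-- ===== SOURCE B (Python) =====
-- import math
--
-- def get_target_layers(total_layers, num_segments, segments_indx, swap_depth):
--     if num_segments <= 0: return list(range(total_layers))
--     layers_per_seg = math.ceil(total_layers / num_segments)
--     valid = {s for s in segments_indx if 0 <= s < num_segments}
--
--     def patched(i):
--         s = i // layers_per_seg
--         end_idx = min(s * layers_per_seg + layers_per_seg, total_layers)
--         return s in valid and i >= max(s * layers_per_seg, end_idx - swap_depth)
--
--     return [i for i in range(total_layers) if patched(i)]
-- ===== Notes on version B (the rewrite author's own statement) =====
-- stated objective: alternative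
-- what changed: A emits each requested segment's patched range, concatenates them, then deduplicates with set() and sorts; B inverts the traversal: it scans every layer index 0..total_layers-1 once and keeps layer i iff its own segment i // layers_per_seg is a valid requested segment and i lies in that segment's patched tail, so the output is sorted and duplicate-free by construction with no set or sort over emitted layers.
import Mathlib
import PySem

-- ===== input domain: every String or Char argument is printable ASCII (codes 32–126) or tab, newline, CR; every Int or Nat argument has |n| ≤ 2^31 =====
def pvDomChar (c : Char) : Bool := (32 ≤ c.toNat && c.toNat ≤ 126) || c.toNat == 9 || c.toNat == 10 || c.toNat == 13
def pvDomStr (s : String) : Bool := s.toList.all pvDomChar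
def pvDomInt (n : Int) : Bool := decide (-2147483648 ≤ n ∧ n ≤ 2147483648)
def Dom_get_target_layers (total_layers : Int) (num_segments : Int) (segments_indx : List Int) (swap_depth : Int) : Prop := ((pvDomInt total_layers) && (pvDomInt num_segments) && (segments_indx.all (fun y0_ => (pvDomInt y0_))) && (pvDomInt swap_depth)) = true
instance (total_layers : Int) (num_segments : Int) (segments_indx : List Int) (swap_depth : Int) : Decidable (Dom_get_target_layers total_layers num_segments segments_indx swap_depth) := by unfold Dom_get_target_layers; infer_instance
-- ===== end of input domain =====

-- B inverts the traversal: instead of emitting each segment's patched range and then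
-- deduplicating and sorting the emitted layers, it scans the layers 0..total_layers-1 once
-- and keeps layer i iff its own segment i // layers_per_seg is a valid requested segment and
-- i lies in that segment's patched tail (objective: alternative).

-- math.ceil(a / b) for ints with 0 < b (exact on the |n| ≤ 2^31 domain, where the float
-- quotient's ceiling equals the rational ceiling): ceil(a/b) = -((-a) // b)
def pvCeilDiv (a b : Int) : Int := -(PySem.Int.floordiv (-a) b)

-- ===== PORT A =====
def get_target_layers (total_layers : Int) (num_segments : Int) (segments_indx : List Int) (swap_depth : Int) : List Int :=
  if num_segments ≤ 0 then PySem.List.pyRange 0 total_layers 1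
  else
    let layers_per_seg := pvCeilDiv total_layers num_segments
    let target_layers := segments_indx.foldl (fun acc seg_idx =>
      if seg_idx < 0 ∨ num_segments ≤ seg_idx then acc
      else
        let start_idx := seg_idx * layers_per_seg
        let end_idx := min (start_idx + layers_per_seg) total_layers
        let patch_start := max start_idx (end_idx - swap_depth)
        acc ++ PySem.List.pyRange patch_start end_idx 1) []
    PySem.List.sorted (PySem.Set.ofList target_layers) (fun x => x) false

-- ===== PORT B =====
-- B's per-layer test: layer i is kept iff its segment i // L is in `valid` and i is in that
-- segment's patched tail
def gtl_patched (total_layers swap_depth L : Int) (valid : List Int) (i : Int) : Bool :=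
  let s := PySem.Int.floordiv i L
  let end_idx := min (s * L + L) total_layers
  valid.contains s && decide (max (s * L) (end_idx - swap_depth) ≤ i)

def get_target_layers_alt (total_layers : Int) (num_segments : Int) (segments_indx : List Int) (swap_depth : Int) : List Int :=
  if num_segments ≤ 0 then PySem.List.pyRange 0 total_layers 1
  else
    let layers_per_seg := pvCeilDiv total_layers num_segments
    let valid := PySem.Set.ofList (segments_indx.filter (fun s => decide (0 ≤ s) && decide (s < num_segments)))
    (PySem.List.pyRange 0 total_layers 1).filter (gtl_patched total_layers swap_depth layers_per_seg valid)

-- ===== PRECONDITION & SPEC =====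
def Spec_get_target_layers (total_layers : Int) (num_segments : Int) (segments_indx : List Int) (swap_depth : Int) (out : List Int) : Prop := out = get_target_layers_alt total_layers num_segments segments_indx swap_depth
instance (total_layers : Int) (num_segments : Int) (segments_indx : List Int) (swap_depth : Int) (out : List Int) : Decidable (Spec_get_target_layers total_layers num_segments segments_indx swap_depth out) := by unfold Spec_get_target_layers; infer_instance

-- ===== CLAIM (what is proved, stated in full; the proofs are below) =====
def Claim_equal_get_target_layers : Prop := ∀ (total_layers : Int) (num_segments : Int) (segments_indx : List Int) (swap_depth : Int), Dom_get_target_layers total_layers num_segments segments_indx swap_depth → Spec_get_target_layers total_layers num_segments segments_indx swap_depth (get_target_layers total_layers num_segments segments_indx swap_depth)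

-- ===== LEMMAS AND PROOFS =====

-- the per-segment interval A emits for a valid segment s
def pvSeg (total_layers swap_depth L s : Int) : List Int :=
  PySem.List.pyRange (max (s * L) (min (s * L + L) total_layers - swap_depth))
                     (min (s * L + L) total_layers) 1

theorem pvSeg_mem {total_layers swap_depth L s x : Int}
    (hx : x ∈ pvSeg total_layers swap_depth L s) :
    max (s * L) (min (s * L + L) total_layers - swap_depth) ≤ x ∧
    x < min (s * L + L) total_layers := by
  simpa [pvSeg, PySem.List.mem_pyRange_one] using hx

-- ceiling-division bracket: (L-1)*ns < total ≤ L*ns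
theorem pvCeilDiv_bracket {total ns : Int} (hns : 0 < ns) :
    (pvCeilDiv total ns - 1) * ns < total ∧ total ≤ pvCeilDiv total ns * ns :=
  (PySem.Int.neg_floordiv_neg_eq_iff_of_pos hns).1 rfl

-- A's loop as a flatMap over the valid segment indices
theorem foldl_A_eq {num_segments total_layers swap_depth L : Int} :
    ∀ (l : List Int) (acc : List Int),
    l.foldl (fun acc seg_idx =>
      if seg_idx < 0 ∨ num_segments ≤ seg_idx then acc
      else acc ++ PySem.List.pyRange
        (max (seg_idx * L) (min (seg_idx * L + L) total_layers - swap_depth))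
        (min (seg_idx * L + L) total_layers) 1) acc
    = acc ++ (l.filter (fun s => decide (0 ≤ s) && decide (s < num_segments))).flatMap
        (pvSeg total_layers swap_depth L) := by
  intro l
  induction l with
  | nil => intro acc; simp
  | cons a tl ih =>
    intro acc
    simp only [List.foldl_cons, List.filter_cons]
    by_cases h : a < 0 ∨ num_segments ≤ a
    · have : (decide (0 ≤ a) && decide (a < num_segments)) = false := by
        simp only [Bool.and_eq_false_iff, decide_eq_false_iff_not]; omega
      rw [if_pos h, this, ih]
      simp
    · have : (decide (0 ≤ a) && decide (a < num_segments)) = true := by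
        simp only [Bool.and_eq_true, decide_eq_true_eq]; omega
      rw [if_neg h, this, ih]
      simp [pvSeg, List.append_assoc]

-- B's filtered layer scan has the same members as A's concatenation of segment intervals
theorem mem_B_iff_mem_flatMap {total_layers num_segments swap_depth : Int}
    (hns : 0 < num_segments) (segs : List Int) (x : Int) :
    (x ∈ (PySem.List.pyRange 0 total_layers 1).filter
        (gtl_patched total_layers swap_depth (pvCeilDiv total_layers num_segments)
          (PySem.Set.ofList (segs.filter (fun s => decide (0 ≤ s) && decide (s < num_segments))))))
    ↔ x ∈ (segs.filter (fun s => decide (0 ≤ s) && decide (s < num_segments))).flatMap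
        (pvSeg total_layers swap_depth (pvCeilDiv total_layers num_segments)) := by
  set L := pvCeilDiv total_layers num_segments with hL
  obtain ⟨hbr1, hbr2⟩ := pvCeilDiv_bracket (total := total_layers) hns
  rw [← hL] at hbr1 hbr2
  constructor
  · intro hx
    rw [List.mem_filter] at hx
    obtain ⟨hxr, hpred⟩ := hx
    rw [PySem.List.mem_pyRange_one] at hxr
    have htot : 1 ≤ total_layers := by omega
    have hLpos : 0 < L := by nlinarith
    simp only [gtl_patched, Bool.and_eq_true, List.contains_eq_mem, decide_eq_true_eq] at hpred
    obtain ⟨hmem, hge⟩ := hpred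
    set s := PySem.Int.floordiv x L with hs
    have hsb : s * L ≤ x ∧ x < (s + 1) * L :=
      (PySem.Int.floordiv_eq_iff_of_pos hLpos).1 rfl
    rw [List.mem_flatMap]
    refine ⟨s, ?_, ?_⟩
    · rw [← PySem.Set.mem_ofList]; exact hmem
    · rw [pvSeg, PySem.List.mem_pyRange_one]
      constructor
      · exact hge
      · have : x < s * L + L := by nlinarith
        omega
  · intro hx
    rw [List.mem_flatMap] at hx
    obtain ⟨t, ht, hxt⟩ := hx
    have htb : (0 ≤ t ∧ t < num_segments) := by
      have := (List.mem_filter.1 ht).2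
      simp only [Bool.and_eq_true, decide_eq_true_eq] at this
      exact this
    obtain ⟨hx1, hx2⟩ := pvSeg_mem hxt
    have hxl : t * L ≤ x := le_trans (le_max_left _ _) hx1
    have hxr : x < t * L + L := lt_of_lt_of_le hx2 (min_le_left _ _)
    have hxtot : x < total_layers := lt_of_lt_of_le hx2 (min_le_right _ _)
    by_cases htot : total_layers ≤ 0
    · -- no layer exists: derive a contradiction
      exfalso
      have hLnp : L ≤ 0 := by nlinarith
      have h1 : num_segments * L ≤ t * L := by nlinarith
      nlinarith
    · have htot' : 1 ≤ total_layers := by omega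
      have hLpos : 0 < L := by nlinarith
      have hx0 : 0 ≤ x := le_trans (mul_nonneg htb.1 (le_of_lt hLpos)) hxl
      rw [List.mem_filter, PySem.List.mem_pyRange_one]
      refine ⟨⟨hx0, hxtot⟩, ?_⟩
      have hfd : PySem.Int.floordiv x L = t :=
        (PySem.Int.floordiv_eq_iff_of_pos hLpos).2 ⟨hxl, by nlinarith⟩
      simp only [gtl_patched, hfd, Bool.and_eq_true, List.contains_eq_mem,
        decide_eq_true_eq]
      exact ⟨by rw [PySem.Set.mem_ofList]; exact ht, hx1⟩

theorem get_target_layers_spec : Claim_equal_get_target_layers := by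
  intro total_layers num_segments segments_indx swap_depth _
  unfold Spec_get_target_layers get_target_layers get_target_layers_alt
  by_cases hns : num_segments ≤ 0
  · simp [hns]
  · simp only [if_neg hns]
    have hns' : 0 < num_segments := by omega
    set L := pvCeilDiv total_layers num_segments with hL
    set P : Int → Bool := fun s => decide (0 ≤ s) && decide (s < num_segments) with hP
    rw [foldl_A_eq, List.nil_append]
    set F := (segments_indx.filter P).flatMap (pvSeg total_layers swap_depth L) with hF
    set B := (PySem.List.pyRange 0 total_layers 1).filter
      (gtl_patched total_layers swap_depth L (PySem.Set.ofList (segments_indx.filter P))) with hB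
    have hB_pw : B.Pairwise (· < ·) :=
      List.Pairwise.sublist List.filter_sublist (PySem.List.pairwise_lt_pyRange_one (a := 0) (b := total_layers))
    have hperm : B.Perm (PySem.Set.ofList F) := by
      refine (List.perm_ext_iff_of_nodup hB_pw.nodup (PySem.Set.nodup_ofList _)).2 ?_
      intro x
      rw [PySem.Set.mem_ofList, hB, hF]
      exact mem_B_iff_mem_flatMap hns' segments_indx x
    exact PySem.List.sorted_eq_of_perm_of_pairwise_lt _ _ (fun x => x) hperm hB_pw
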